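-- pv_equiv track=rewrite | github.com/Maxeden89/Telefunken | game/rules.py | can_form_sequence
-- ===== SOURCE A (Python) =====
-- def can_form_sequence(values, jokers):
--     """
--     Determina si se puede formar una escalera y sirve como validador.
--     """
--     # Si devuelve un valor (o None si no hay jokers), es válida
--     if jokers == 0:
--         # Validación estándar de escalera sin jokers
--         v_sorted = sorted(values)
--         # Caso As circular (K-A-2)
--         if 1 in v_sorted and 13 in v_sorted:
--             v_alt = sorted([v if v != 1 else 14 for v in v_sorted])
--             return all(v_alt[i+1] - v_alt[i] == 1 for i in range(len(v_alt)-1))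
--         return all(v_sorted[i+1] - v_sorted[i] == 1 for i in range(len(v_sorted)-1))
--
--     # Si hay jokers, chequeamos si existe un valor que complete el hueco
--     return get_joker_needed_value(values, jokers) is not None
--
-- def get_joker_needed_value(values, jokers):
--     """
--     Lógica interna para encontrar qué carta reemplaza el Joker.
--     """
--     target_len = len(values) + jokers
--     if target_len > 13: return None
--
--     for start in range(1, 14):
--         needed_vals = []
--         for i in range(target_len):
--             val = (start + i - 1) % 13 + 1
--             if val not in values:
--                 needed_vals.append(val)
--
--         if len(needed_vals) == jokers:
--             return needed_vals[0] # Retorna el primer valor que falta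
--     return None
-- ===== SOURCE B (Python) =====
-- def can_form_sequence(values, jokers):
--     if jokers == 0:
--         # Closed-form run test: distinct values spanning exactly len-1, with 1->14 when K-A wrap applies.
--         if len(values) < 2:
--             return True
--         vs = [14 if v == 1 else v for v in values] if (1 in values and 13 in values) else values
--         return len(set(vs)) == len(vs) and max(vs) - min(vs) == len(vs) - 1
--     if jokers < 0 or len(values) + jokers > 13:
--         return False
--     target_len = len(values) + jokers
--     present = set(values)
--     return any(
--         sum(1 for i in range(target_len) if (start + i - 1) % 13 + 1 in present) == len(values)
--         for start in range(1, 14)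
--     )
-- ===== Notes on version B (the rewrite author's own statement) =====
-- stated objective: simpler
-- what changed: The no-joker run test is replaced by a closed-form test (all values distinct and max-min = len-1 after the K-A wrap substitution) instead of sorting and scanning consecutive differences, and the joker search becomes a direct boolean existence check over the 13 start windows counting present values against a prebuilt set.
import Mathlib
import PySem

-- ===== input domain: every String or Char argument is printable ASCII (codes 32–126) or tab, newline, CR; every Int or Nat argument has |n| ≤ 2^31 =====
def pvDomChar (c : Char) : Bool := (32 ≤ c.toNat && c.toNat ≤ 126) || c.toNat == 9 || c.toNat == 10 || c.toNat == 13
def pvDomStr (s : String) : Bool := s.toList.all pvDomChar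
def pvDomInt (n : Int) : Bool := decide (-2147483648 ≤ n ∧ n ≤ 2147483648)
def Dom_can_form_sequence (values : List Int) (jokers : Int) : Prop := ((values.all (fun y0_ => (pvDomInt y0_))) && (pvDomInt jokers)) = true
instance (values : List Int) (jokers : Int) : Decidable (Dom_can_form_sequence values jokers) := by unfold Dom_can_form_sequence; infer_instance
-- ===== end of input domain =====

-- B replaces A's sort-and-scan run test (jokers = 0) by a closed-form distinctness/span test; objective: simpler.

-- ===== PORT A =====
-- Search loop of get_joker_needed_value over the remaining start values.
-- needed_vals[0] is ported as head?: exact whenever jokers ≠ 0 (the only way can_form_sequence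
-- reaches it), since the branch fires with needed_vals.length = jokers, so the list is nonempty.
def gjnvLoop (values : List Int) (jokers : Int) (target_len : Int) : List Int → Option Int
  | [] => none
  | start :: rest =>
      let needed_vals := ((PySem.List.pyRange 0 target_len).map
        (fun i => PySem.Int.mod (start + i - 1) 13 + 1)).filter (fun v => !(values.contains v))
      if (needed_vals.length : Int) = jokers then needed_vals.head?
      else gjnvLoop values jokers target_len rest

def get_joker_needed_value (values : List Int) (jokers : Int) : Option Int :=
  let target_len : Int := (values.length : Int) + jokers
  if target_len > 13 then none
  else gjnvLoop values jokers target_len (PySem.List.pyRange 1 14)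

-- the indexing v[i], v[i+1] is ported with pyGetD 0: exact, since 0 ≤ i and i+1 < len inside the range
def can_form_sequence (values : List Int) (jokers : Int) : Bool :=
  if jokers = 0 then
    let v_sorted := PySem.List.sorted values (fun v => v)
    if v_sorted.contains 1 && v_sorted.contains 13 then
      let v_alt := PySem.List.sorted (v_sorted.map (fun v => if v ≠ 1 then v else 14)) (fun v => v)
      (PySem.List.pyRange 0 ((v_alt.length : Int) - 1)).all
        (fun i => PySem.List.pyGetD v_alt (i + 1) 0 - PySem.List.pyGetD v_alt i 0 == 1)
    else
      (PySem.List.pyRange 0 ((v_sorted.length : Int) - 1)).all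
        (fun i => PySem.List.pyGetD v_sorted (i + 1) 0 - PySem.List.pyGetD v_sorted i 0 == 1)
  else
    (get_joker_needed_value values jokers).isSome

-- ===== PORT B =====
-- max(vs)/min(vs) are ported with .getD 0: exact, since vs ≠ [] on that branch (length ≥ 2)
def can_form_sequence_alt (values : List Int) (jokers : Int) : Bool :=
  if jokers = 0 then
    if values.length < 2 then true
    else
      let vs := if values.contains 1 && values.contains 13
                then values.map (fun v => if v == 1 then 14 else v) else values
      ((PySem.Set.ofList vs).length == vs.length) &&
        ((PySem.List.max? vs (fun v => v)).getD 0 - (PySem.List.min? vs (fun v => v)).getD 0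
          == (vs.length : Int) - 1)
  else if jokers < 0 || (values.length : Int) + jokers > 13 then false
  else
    let target_len : Int := (values.length : Int) + jokers
    let present := PySem.Set.ofList values
    (PySem.List.pyRange 1 14).any (fun start =>
      ((PySem.List.pyRange 0 target_len).map
        (fun i => if PySem.Set.contains present (PySem.Int.mod (start + i - 1) 13 + 1)
                  then (1 : Int) else 0)).sum == (values.length : Int))

-- ===== PRECONDITION & SPEC =====
def Spec_can_form_sequence (values : List Int) (jokers : Int) (out : Bool) : Prop := out = can_form_sequence_alt values jokers
instance (values : List Int) (jokers : Int) (out : Bool) : Decidable (Spec_can_form_sequence values jokers out) := by unfold Spec_can_form_sequence; infer_instance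

-- ===== CLAIM (what is proved, stated in full; the proofs are below) =====
def Claim_equal_can_form_sequence : Prop := ∀ (values : List Int) (jokers : Int), Dom_can_form_sequence values jokers → Spec_can_form_sequence values jokers (can_form_sequence values jokers)

-- ===== LEMMAS AND PROOFS =====

lemma countP_split (l : List Int) (p : Int → Bool) :
    l.countP p + l.countP (fun x => !p x) = l.length := by
  induction l with
  | nil => simp
  | cons a t ih => by_cases h : p a <;> simp [h] <;> omega

lemma contains_ofList (xs : List Int) (v : Int) :
    PySem.Set.contains (PySem.Set.ofList xs) v = xs.contains v := by
  simp [PySem.Set.contains, PySem.Set.mem_ofList]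

lemma ofList_length_iff (xs : List Int) :
    (PySem.Set.ofList xs).length = xs.length ↔ xs.Nodup := by
  have htf : (PySem.Set.ofList xs).toFinset = xs.toFinset := by
    ext y; simp [PySem.Set.mem_ofList]
  have h1 : (PySem.Set.ofList xs).toFinset.card = (PySem.Set.ofList xs).length :=
    List.toFinset_card_of_nodup (PySem.Set.nodup_ofList xs)
  constructor
  · intro h
    have hcard : xs.toFinset.card = xs.length := by rw [← htf, h1, h]
    rw [List.card_toFinset] at hcard
    have h2 := (List.dedup_sublist xs).eq_of_length hcard
    rw [← h2]; exact xs.nodup_dedup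
  · intro hnd
    rw [← h1, htf, List.toFinset_card_of_nodup hnd]

-- the A-side scan over consecutive differences, as a statement about getElem
lemma chain_eq_true_iff (s : List Int) :
    ((PySem.List.pyRange 0 ((s.length : Int) - 1)).all
      (fun i => PySem.List.pyGetD s (i + 1) 0 - PySem.List.pyGetD s i 0 == 1)) = true ↔
    (∀ k (h : k + 1 < s.length), s[k + 1]'h = s[k]'(by omega) + 1) := by
  rw [List.all_eq_true]
  constructor
  · intro h k hk
    have hm : (k : Int) ∈ PySem.List.pyRange 0 ((s.length : Int) - 1) :=
      PySem.List.mem_pyRange_one.mpr ⟨by omega, by omega⟩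
    have := h _ hm
    rw [PySem.List.pyGetD_eq_getElem s 0 (by omega) (by omega),
        PySem.List.pyGetD_eq_getElem s 0 (by omega) (by omega), beq_iff_eq] at this
    have e1 : ((k : Int) + 1).toNat = k + 1 := by omega
    have e2 : ((k : Int)).toNat = k := by omega
    simp only [e1, e2] at this
    omega
  · intro h i hi
    have hb := PySem.List.mem_pyRange_one.mp hi
    rw [PySem.List.pyGetD_eq_getElem s 0 (by omega) (by omega),
        PySem.List.pyGetD_eq_getElem s 0 (by omega) (by omega), beq_iff_eq]
    have e1 : (i + 1).toNat = i.toNat + 1 := by omega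
    simp only [e1]
    have := h i.toNat (by omega)
    omega

lemma getElem_formula (s : List Int) (h : ∀ k (hk : k + 1 < s.length), s[k + 1]'hk = s[k]'(by omega) + 1) :
    ∀ k (hk : k < s.length), s[k]'hk = s[0]'(by omega) + (k : Int) := by
  intro k
  induction k with
  | zero => intro hk; simp
  | succ n ih =>
      intro hk
      have h1 := h n hk
      have h2 := ih (by omega)
      rw [h1, h2]; push_cast; ring

lemma gap_lower (s : List Int) (hlt : List.Pairwise (· < ·) s) :
    ∀ i j (hij : i ≤ j) (hj : j < s.length), s[i]'(by omega) + ((j : Int) - (i : Int)) ≤ s[j]'hj := by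
  intro i j hij
  induction j, hij using Nat.le_induction with
  | base => intro hj; simp
  | succ j hij ih =>
      intro hj
      have h1 := ih (by omega)
      have h2 : s[j]'(by omega) < s[j + 1]'hj :=
        List.pairwise_iff_getElem.mp hlt j (j + 1) (by omega) hj (by omega)
      push_cast
      omega

lemma chain_iff_char (s : List Int) (hp : s.Pairwise (· ≤ ·)) (hn : 2 ≤ s.length) :
    (∀ k (h : k + 1 < s.length), s[k + 1]'h = s[k]'(by omega) + 1) ↔
    (s.Nodup ∧ s[s.length - 1]'(by omega) - s[0]'(by omega) = (s.length : Int) - 1) := by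
  constructor
  · intro h
    have form := getElem_formula s h
    refine ⟨?_, ?_⟩
    · show List.Pairwise (· ≠ ·) s
      rw [List.pairwise_iff_getElem]
      intro i j hi hj hij
      rw [form i hi, form j hj]
      intro hc; omega
    · rw [form (s.length - 1) (by omega), form 0 (by omega)]
      omega
  · rintro ⟨hnd, hspan⟩
    have hne : List.Pairwise (· ≠ ·) s := hnd
    have hlt : List.Pairwise (· < ·) s := by
      rw [List.pairwise_iff_getElem] at hp hne ⊢
      intro i j hi hj hij
      have := hp i j hi hj hij
      have := hne i j hi hj hij
      omega
    intro k hk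
    have g1 := gap_lower s hlt 0 k (by omega) (by omega)
    have g2 := gap_lower s hlt (k + 1) (s.length - 1) (by omega) (by omega)
    have g3 := gap_lower s hlt k (k + 1) (by omega) hk
    push_cast at g1 g2 g3
    omega

lemma max?_getD_eq_sorted_last (m : List Int) (hne : 1 ≤ m.length) :
    (PySem.List.max? m (fun v => v)).getD 0 =
      (PySem.List.sorted m (fun v => v))[(PySem.List.sorted m (fun v => v)).length - 1]'(by
        rw [PySem.List.length_sorted]; omega) := by
  cases hm : PySem.List.max? m (fun v => v) with
  | none =>
      rw [PySem.List.max?_eq_none_iff] at hm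
      subst hm; simp at hne
  | some M =>
      have hlen : (PySem.List.sorted m (fun v => v)).length = m.length := PySem.List.length_sorted m (fun v => v) false
      have hmem : (PySem.List.sorted m (fun v => v))[(PySem.List.sorted m (fun v => v)).length - 1]'(by omega) ∈ m := by
        rw [← PySem.List.mem_sorted m (fun v => v) false]
        exact List.getElem_mem _
      have le1 := PySem.List.max?_isMax hm _ hmem
      have hMs : M ∈ PySem.List.sorted m (fun v => v) := by
        rw [PySem.List.mem_sorted]; exact PySem.List.max?_mem hm
      obtain ⟨j, hj, hMe⟩ := List.mem_iff_getElem.mp hMs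
      have le2 : M ≤ (PySem.List.sorted m (fun v => v))[(PySem.List.sorted m (fun v => v)).length - 1]'(by omega) := by
        rw [← hMe]
        have := List.pairwise_iff_getElem.mp (PySem.List.sorted_pairwise m (fun v => v))
        rcases Nat.lt_or_ge j ((PySem.List.sorted m (fun v => v)).length - 1) with hlt | hge
        · exact this j _ hj (by omega) hlt
        · have : j = (PySem.List.sorted m (fun v => v)).length - 1 := by omega
          subst this; exact le_rfl
      simp only [Option.getD_some]
      exact le_antisymm le2 le1

lemma min?_getD_eq_sorted_head (m : List Int) (hne : 1 ≤ m.length) :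
    (PySem.List.min? m (fun v => v)).getD 0 =
      (PySem.List.sorted m (fun v => v))[0]'(by rw [PySem.List.length_sorted]; omega) := by
  cases hm : PySem.List.min? m (fun v => v) with
  | none =>
      rw [PySem.List.min?_eq_none_iff] at hm
      subst hm; simp at hne
  | some M =>
      have hmem : (PySem.List.sorted m (fun v => v))[0]'(by rw [PySem.List.length_sorted]; omega) ∈ m := by
        rw [← PySem.List.mem_sorted m (fun v => v) false]
        exact List.getElem_mem _
      have le1 := PySem.List.min?_isMin hm _ hmem
      have hMs : M ∈ PySem.List.sorted m (fun v => v) := by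
        rw [PySem.List.mem_sorted]; exact PySem.List.min?_mem hm
      obtain ⟨j, hj, hMe⟩ := List.mem_iff_getElem.mp hMs
      have le2 : (PySem.List.sorted m (fun v => v))[0]'(by rw [PySem.List.length_sorted]; omega) ≤ M := by
        rw [← hMe]
        have := List.pairwise_iff_getElem.mp (PySem.List.sorted_pairwise m (fun v => v))
        rcases Nat.eq_zero_or_pos j with h0 | h0
        · subst h0; exact le_rfl
        · exact this 0 j (by omega) hj h0
      simp only [Option.getD_some]
      exact le_antisymm le1 le2

-- the zero-joker branch: A's scan of sorted m equals B's closed-form test on m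
lemma zero_branch_eq (m : List Int) (hn : 2 ≤ m.length) :
    ((PySem.List.pyRange 0 (((PySem.List.sorted m (fun v => v)).length : Int) - 1)).all
      (fun i => PySem.List.pyGetD (PySem.List.sorted m (fun v => v)) (i + 1) 0 -
                PySem.List.pyGetD (PySem.List.sorted m (fun v => v)) i 0 == 1)) =
    (((PySem.Set.ofList m).length == m.length) &&
      ((PySem.List.max? m (fun v => v)).getD 0 - (PySem.List.min? m (fun v => v)).getD 0
        == (m.length : Int) - 1)) := by
  have hlen : (PySem.List.sorted m (fun v => v)).length = m.length :=
    PySem.List.length_sorted m (fun v => v) false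
  have hperm : (PySem.List.sorted m (fun v => v)).Perm m := PySem.List.sorted_perm m _ false
  rw [Bool.eq_iff_iff, chain_eq_true_iff,
      chain_iff_char _ (PySem.List.sorted_pairwise m (fun v => v)) (by omega)]
  rw [Bool.and_eq_true, beq_iff_eq, beq_iff_eq]
  rw [max?_getD_eq_sorted_last m (by omega), min?_getD_eq_sorted_head m (by omega),
      ofList_length_iff]
  have e : (((PySem.List.sorted m (fun v => v)).length : Int)) = (m.length : Int) := by
    rw [hlen]
  constructor
  · rintro ⟨h1, h2⟩
    exact ⟨hperm.nodup_iff.mp h1, by rw [← e]; exact h2⟩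
  · rintro ⟨h1, h2⟩
    exact ⟨hperm.nodup_iff.mpr h1, by rw [e]; exact h2⟩

-- the joker-branch window test: A's missing-count condition equals B's present-count condition
lemma window_cond_eq (values : List Int) (jokers : Int) (hj : ¬jokers < 0) (start : Int) :
    (decide (((((PySem.List.pyRange 0 ((values.length : Int) + jokers)).map
        (fun i => PySem.Int.mod (start + i - 1) 13 + 1)).filter
        (fun v => !(values.contains v))).length : Int) = jokers)) =
    (((PySem.List.pyRange 0 ((values.length : Int) + jokers)).map
        (fun i => if PySem.Set.contains (PySem.Set.ofList values) (PySem.Int.mod (start + i - 1) 13 + 1)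
                  then (1 : Int) else 0)).sum == (values.length : Int)) := by
  have e1 : ((PySem.List.pyRange 0 ((values.length : Int) + jokers)).map
        (fun i => if PySem.Set.contains (PySem.Set.ofList values) (PySem.Int.mod (start + i - 1) 13 + 1)
                  then (1 : Int) else 0)).sum =
      ((PySem.List.pyRange 0 ((values.length : Int) + jokers)).countP
        (fun i => values.contains (PySem.Int.mod (start + i - 1) 13 + 1)) : Int) := by
    rw [show (fun i => if PySem.Set.contains (PySem.Set.ofList values) (PySem.Int.mod (start + i - 1) 13 + 1)
                  then (1 : Int) else 0) =
        (fun i => if (fun i => values.contains (PySem.Int.mod (start + i - 1) 13 + 1)) i = true then (1 : Int) else 0) from by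
      funext i; rw [contains_ofList]]
    exact PySem.List.sum_map_ite_one_zero _ _
  rw [e1]
  have e2 : (((PySem.List.pyRange 0 ((values.length : Int) + jokers)).map
        (fun i => PySem.Int.mod (start + i - 1) 13 + 1)).filter
        (fun v => !(values.contains v))).length =
      ((PySem.List.pyRange 0 ((values.length : Int) + jokers)).countP
        (fun i => !(values.contains (PySem.Int.mod (start + i - 1) 13 + 1)))) := by
    rw [← List.countP_eq_length_filter, List.countP_map]
    rfl
  rw [e2]
  have hsplit := countP_split (PySem.List.pyRange 0 ((values.length : Int) + jokers))
    (fun i => values.contains (PySem.Int.mod (start + i - 1) 13 + 1))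
  rw [PySem.List.length_pyRange_one] at hsplit
  rw [Bool.eq_iff_iff, decide_eq_true_iff, beq_iff_eq]
  omega

lemma gjnvLoop_isSome (values : List Int) (jokers : Int) (t : Int) (hj : jokers ≠ 0) :
    ∀ starts : List Int,
      (gjnvLoop values jokers t starts).isSome =
      starts.any (fun start =>
        decide (((((PySem.List.pyRange 0 t).map
          (fun i => PySem.Int.mod (start + i - 1) 13 + 1)).filter
          (fun v => !(values.contains v))).length : Int) = jokers)) := by
  intro starts
  induction starts with
  | nil => rfl
  | cons start rest ih =>
      rw [gjnvLoop, List.any_cons]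
      by_cases h : ((((PySem.List.pyRange 0 t).map
          (fun i => PySem.Int.mod (start + i - 1) 13 + 1)).filter
          (fun v => !(values.contains v))).length : Int) = jokers
      · rw [if_pos h, decide_eq_true h, Bool.true_or]
        have hne : (((PySem.List.pyRange 0 t).map
            (fun i => PySem.Int.mod (start + i - 1) 13 + 1)).filter
            (fun v => !(values.contains v))) ≠ [] := by
          intro hc; rw [hc] at h; simp at h; omega
        cases hl : (((PySem.List.pyRange 0 t).map
            (fun i => PySem.Int.mod (start + i - 1) 13 + 1)).filter
            (fun v => !(values.contains v))) with
        | nil => exact absurd hl hne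
        | cons a b => simp
      · rw [if_neg h, decide_eq_false h, Bool.false_or, ih]

theorem can_form_sequence_spec_aux (values : List Int) (jokers : Int) :
    can_form_sequence values jokers = can_form_sequence_alt values jokers := by
  by_cases hj : jokers = 0
  · subst hj
    rw [can_form_sequence, can_form_sequence_alt, if_pos rfl, if_pos rfl]
    simp only []
    by_cases hlen : values.length < 2
    · rw [if_pos hlen]
      have small : ∀ l : List Int, l.length < 2 →
          ((PySem.List.pyRange 0 ((l.length : Int) - 1)).all
            (fun i => PySem.List.pyGetD l (i + 1) 0 - PySem.List.pyGetD l i 0 == 1)) = true := by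
        intro l hl
        rw [List.all_eq_true]
        intro i hi
        have := PySem.List.mem_pyRange_one.mp hi
        omega
      by_cases hc : (PySem.List.sorted values (fun v => v)).contains 1 &&
          (PySem.List.sorted values (fun v => v)).contains 13
      · rw [if_pos hc]
        apply small
        rw [PySem.List.length_sorted, List.length_map, PySem.List.length_sorted]
        exact hlen
      · rw [if_neg hc]
        apply small
        rw [PySem.List.length_sorted]
        exact hlen
    · rw [if_neg hlen]
      have hcond : ((PySem.List.sorted values (fun v => v)).contains 1 &&
            (PySem.List.sorted values (fun v => v)).contains 13) =
          (values.contains 1 && values.contains 13) := by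
        have h1 : ∀ v : Int, (PySem.List.sorted values (fun x => x)).contains v = values.contains v := by
          intro v; simp [PySem.List.mem_sorted]
        rw [h1, h1]
      rw [hcond]
      by_cases hc : values.contains 1 && values.contains 13
      · rw [if_pos hc, if_pos hc]
        -- the mapped multisets agree up to permutation, so A's doubly-sorted list is sorted of B's list
        have hmapeq : (fun v : Int => if v ≠ 1 then v else 14) = (fun v : Int => if v == 1 then 14 else v) := by
          funext v; by_cases h : v = 1 <;> simp [h]
        have hperm : ((PySem.List.sorted values (fun v => v)).map (fun v => if v ≠ 1 then v else 14)).Perm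
            (values.map (fun v => if v == 1 then 14 else v)) := by
          rw [hmapeq]
          exact (PySem.List.sorted_perm values (fun v => v) false).map _
        have hse : PySem.List.sorted ((PySem.List.sorted values (fun v => v)).map (fun v => if v ≠ 1 then v else 14)) (fun v => v) =
            PySem.List.sorted (values.map (fun v => if v == 1 then 14 else v)) (fun v => v) :=
          PySem.List.sorted_eq_sorted_of_perm _ _ _ (fun a b h => h) hperm
        rw [hse]
        exact zero_branch_eq _ (by rw [List.length_map]; omega)
      · rw [if_neg hc, if_neg hc]
        exact zero_branch_eq values (by omega)
  · rw [can_form_sequence, can_form_sequence_alt, if_neg hj, if_neg hj,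
        get_joker_needed_value]
    simp only []
    by_cases hbig : (values.length : Int) + jokers > 13
    · rw [if_pos hbig]
      have : (jokers < 0 || (values.length : Int) + jokers > 13) = true := by
        simp; omega
      rw [this]; rfl
    · rw [if_neg hbig]
      rw [gjnvLoop_isSome values jokers _ hj]
      by_cases hneg : jokers < 0
      · have hg : (decide (jokers < 0) || decide ((values.length : Int) + jokers > 13)) = true := by
          simp; omega
        simp only [hg, if_true]
        rw [List.any_eq_false.mpr]
        intro start _
        simp only [decide_eq_true_iff]
        intro hc
        omega
      · have hg : (decide (jokers < 0) || decide ((values.length : Int) + jokers > 13)) = false := by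
          simp; omega
        simp only [hg]
        exact congrArg (List.any (PySem.List.pyRange 1 14))
          (funext fun start => window_cond_eq values jokers hneg start)

-- ===== VERDICT (by name: the statement is the Claim_ definition above) =====
theorem can_form_sequence_spec : Claim_equal_can_form_sequence := by
  intro values jokers _
  exact can_form_sequence_spec_aux values jokers
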